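-- pv_equiv track=rewrite | github.com/frankhjh/EasyML | Imbalance_data/gan_upsampler/utils.py | get_start_end
-- ===== SOURCE A (Python) =====
-- def get_start_end(target_col_idx,ouptut_info):
--
--     start = 0
--
--     cate_c = 0
--     all_c = 0
--
--     for item in ouptut_info:
--         if cate_c == target_col_idx:
--             break
--         if item[1] == 'tanh':
--             start += item[0]
--         elif item[1] == 'softmax':
--             start += item[0]
--             cate_c += 1
--         all_c += 1
--
--     end = start + ouptut_info[all_c][0]
--
--     return (start,end)
-- ===== SOURCE B (Python) =====
-- def get_start_end(target_col_idx, ouptut_info):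
--     if target_col_idx == 0:
--         idx = 0
--     else:
--         soft = [i for i, item in enumerate(ouptut_info) if item[1] == 'softmax']
--         idx = soft[target_col_idx - 1] + 1
--     start = sum(item[0] for item in ouptut_info[:idx]
--                 if item[1] in ('tanh', 'softmax'))
--     return (start, start + ouptut_info[idx][0])
-- ===== Notes on version B (the rewrite author's own statement) =====
-- stated objective: alternative
-- what changed: A's single interleaved accumulate-and-count loop with break is replaced by an index-then-sum decomposition: first locate the break position (0 for target 0, else one past the target-th softmax column found via enumerate), then sum the tanh/softmax sizes of the prefix before it.
import Mathlib
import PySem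

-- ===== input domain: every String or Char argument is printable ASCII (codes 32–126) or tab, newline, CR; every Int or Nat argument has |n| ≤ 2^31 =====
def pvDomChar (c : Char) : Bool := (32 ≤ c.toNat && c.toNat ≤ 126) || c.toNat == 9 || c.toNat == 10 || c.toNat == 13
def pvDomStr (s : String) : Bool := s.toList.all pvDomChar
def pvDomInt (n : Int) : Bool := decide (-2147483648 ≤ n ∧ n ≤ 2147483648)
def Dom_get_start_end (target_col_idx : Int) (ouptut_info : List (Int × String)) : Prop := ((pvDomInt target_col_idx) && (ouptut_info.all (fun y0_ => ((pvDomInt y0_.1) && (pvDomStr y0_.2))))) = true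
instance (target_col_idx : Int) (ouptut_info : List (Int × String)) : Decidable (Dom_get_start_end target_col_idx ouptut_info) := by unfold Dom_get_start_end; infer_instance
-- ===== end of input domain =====

-- B replaces A's interleaved accumulate-and-count loop by an index-then-sum decomposition
-- (find the break position first, then sum the prefix sizes); alternative, same cost.

-- ===== PORT A =====
-- the for-loop of A: state (cate_c, start, all_c), early exit on cate_c == target (break)
def pvLoopA (target : Int) : List (Int × String) → Int → Int → Int → Int × Int
  | [], _, start, all_c => (start, all_c)
  | item :: rest, cate_c, start, all_c =>
    if cate_c = target then (start, all_c)
    else if item.2 = "tanh" then pvLoopA target rest cate_c (start + item.1) (all_c + 1)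
    else if item.2 = "softmax" then pvLoopA target rest (cate_c + 1) (start + item.1) (all_c + 1)
    else pvLoopA target rest cate_c start (all_c + 1)

def get_start_end (target_col_idx : Int) (ouptut_info : List (Int × String)) : Int × Int :=
  let r := pvLoopA target_col_idx ouptut_info 0 0 0
  -- ouptut_info[all_c] raises IndexError when out of range: excluded by Pre_
  let e := (PySem.List.pyGet? ouptut_info r.2).getD (0, "")
  (r.1, r.1 + e.1)

-- ===== PORT B =====
def get_start_end_alt (target_col_idx : Int) (ouptut_info : List (Int × String)) : Int × Int :=
  let idx : Int :=
    if target_col_idx = 0 then 0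
    else
      let soft := ((PySem.List.enumerate ouptut_info 0).filter
        (fun p => p.2.2 == "softmax")).map (·.1)
      -- soft[target_col_idx - 1] raises when out of range: excluded by Pre_
      ((PySem.List.pyGet? soft (target_col_idx - 1)).getD 0) + 1
  let start := (((PySem.List.slice ouptut_info none (some idx)).filter
      (fun item => item.2 == "tanh" || item.2 == "softmax")).map (·.1)).sum
  (start, start + ((PySem.List.pyGet? ouptut_info idx).getD (0, "")).1)

-- ===== PRECONDITION & SPEC =====
-- Pre_ = exactly the inputs where A returns: either target 0 on a nonempty list, or a
-- positive target with at least that many 'softmax' items among all but the last item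
-- (otherwise the loop never breaks, or breaks past the end, and ouptut_info[all_c] raises IndexError).
def Pre_get_start_end (target_col_idx : Int) (ouptut_info : List (Int × String)) : Prop :=
  (target_col_idx = 0 ∧ ouptut_info ≠ []) ∨
  (1 ≤ target_col_idx ∧
    target_col_idx ≤ ((ouptut_info.dropLast).filter (fun p => p.2 == "softmax")).length)
instance (target_col_idx : Int) (ouptut_info : List (Int × String)) : Decidable (Pre_get_start_end target_col_idx ouptut_info) := by unfold Pre_get_start_end; infer_instance

def pvWitness_get_start_end : Int × (List (Int × String)) := (1, [(2, "softmax"), (3, "tanh")])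

def Spec_get_start_end (target_col_idx : Int) (ouptut_info : List (Int × String)) (out : Int × Int) : Prop := out = get_start_end_alt target_col_idx ouptut_info
instance (target_col_idx : Int) (ouptut_info : List (Int × String)) (out : Int × Int) : Decidable (Spec_get_start_end target_col_idx ouptut_info out) := by unfold Spec_get_start_end; infer_instance

-- ===== CLAIM (what is proved, stated in full; the proofs are below) =====
def Claim_equal_get_start_end : Prop := ∀ (target_col_idx : Int) (ouptut_info : List (Int × String)), Dom_get_start_end target_col_idx ouptut_info → Pre_get_start_end target_col_idx ouptut_info → Spec_get_start_end target_col_idx ouptut_info (get_start_end target_col_idx ouptut_info)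

-- ===== LEMMAS AND PROOFS =====

-- the index at which A's loop breaks (list length if it never does)
def pvBrk (t : Int) : List (Int × String) → Nat
  | [] => 0
  | item :: rest =>
    if t = 0 then 0
    else if item.2 = "softmax" then pvBrk (t - 1) rest + 1
    else pvBrk t rest + 1

-- prefix sum of tanh/softmax sizes, in B's shape
def pvSP (xs : List (Int × String)) : Int :=
  ((xs.filter (fun item => item.2 == "tanh" || item.2 == "softmax")).map (·.1)).sum

-- A's loop computed by the index-then-sum decomposition
theorem pvLoopA_eq (t : Int) (l : List (Int × String)) :
    ∀ (c s a : Int), pvLoopA t l c s a =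
      (s + pvSP (l.take (pvBrk (t - c) l)), a + (pvBrk (t - c) l : Int)) := by
  induction l with
  | nil => intro c s a; simp [pvLoopA, pvBrk, pvSP]
  | cons item rest ih =>
    intro c s a
    by_cases hc : c = t
    · simp [pvLoopA, pvBrk, hc, pvSP]
    · have htc : ¬ (t - c = 0) := by omega
      by_cases ht : item.2 = "tanh"
      · have hs : ¬ (item.2 = "softmax") := by simp [ht]
        simp [pvLoopA, pvBrk, hc, ht, htc, ih, pvSP, List.take_succ_cons]
        constructor
        · ring
        · omega
      · by_cases hs : item.2 = "softmax"
        · have h1 : t - (c + 1) = t - c - 1 := by ring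
          simp [pvLoopA, pvBrk, hc, hs, htc, ih, h1, pvSP, List.take_succ_cons]
          constructor
          · ring
          · omega
        · simp [pvLoopA, pvBrk, hc, ht, hs, htc, ih, pvSP, List.take_succ_cons]
          omega

theorem pvBrk_zero (l : List (Int × String)) : pvBrk 0 l = 0 := by
  cases l <;> simp [pvBrk]

-- the softmax-index list built by B, with a general enumerate offset
def pvSoft (l : List (Int × String)) (s : Int) : List Int :=
  ((PySem.List.enumerate l s).filter (fun p => p.2.2 == "softmax")).map (·.1)

theorem pvSoft_getElem? (l : List (Int × String)) :
    ∀ (s : Int) (k : Nat), k < (l.filter (fun p => p.2 == "softmax")).length →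
      (pvSoft l s)[k]? = some (s + (pvBrk ((k : Int) + 1) l : Int) - 1) := by
  induction l with
  | nil => intro s k hk; simp at hk
  | cons item rest ih =>
    intro s k hk
    by_cases hs : item.2 = "softmax"
    · have hsoft : pvSoft (item :: rest) s = s :: pvSoft rest (s + 1) := by
        simp [pvSoft, PySem.List.enumerate_cons, hs]
      cases k with
      | zero =>
        have h1 : pvBrk 1 (item :: rest) = 1 := by
          rw [pvBrk]; simp [hs, pvBrk_zero]
        simp [hsoft, h1]
      | succ k' =>
        have hk' : k' < (rest.filter (fun p => p.2 == "softmax")).length := by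
          simp [hs] at hk; omega
        have harg : ((k' : Int) + 1 + 1) - 1 = (k' : Int) + 1 := by ring
        have hbrk : pvBrk ((k' : Int) + 1 + 1) (item :: rest)
            = pvBrk ((k' : Int) + 1) rest + 1 := by
          rw [pvBrk]; simp [hs, harg]; omega
        have := ih (s + 1) k' hk'
        simp [hsoft, List.getElem?_cons_succ, this]
        push_cast [hbrk]
        ring
    · have hsoft : pvSoft (item :: rest) s = pvSoft rest (s + 1) := by
        simp [pvSoft, PySem.List.enumerate_cons, hs]
      have hk' : k < (rest.filter (fun p => p.2 == "softmax")).length := by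
        simp [hs] at hk; exact hk
      have hbrk : pvBrk ((k : Int) + 1) (item :: rest)
          = pvBrk ((k : Int) + 1) rest + 1 := by
        rw [pvBrk]; simp [hs]; omega
      rw [hsoft, ih (s + 1) k hk', hbrk]
      push_cast
      ring

theorem filter_take_le (l : List (Int × String)) (m : Nat) (p : Int × String → Bool) :
    ((l.take m).filter p).length ≤ (l.filter p).length := by
  conv_rhs => rw [← List.take_append_drop m l]
  rw [List.filter_append, List.length_append]
  omega

-- ===== VERDICT (by name: the statement is the Claim_ definition above) =====
theorem get_start_end_spec : Claim_equal_get_start_end := by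
  intro t l _ hpre
  unfold Spec_get_start_end get_start_end get_start_end_alt
  rcases hpre with ⟨ht0, hne⟩ | ⟨ht1, hcnt⟩
  · -- target 0, nonempty list: break before the first item
    subst ht0
    cases l with
    | nil => exact absurd rfl hne
    | cons x xs =>
      have hloop : pvLoopA 0 (x :: xs) 0 0 0 = (0, 0) := by simp [pvLoopA]
      have hslice : PySem.List.slice (x :: xs) none (some (0 : Int)) = [] := by
        rw [PySem.List.slice_to (x :: xs) (by omega)]; simp
      simp [hloop, hslice]
  · -- positive target: both sides compute the break index n = pvBrk t l
    have hne0 : ¬ (t = 0) := by omega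
    have hloop := pvLoopA_eq t l 0 0 0
    rw [sub_zero] at hloop
    have hmono := filter_take_le l (l.length - 1) (fun p => p.2 == "softmax")
    rw [List.dropLast_eq_take] at hcnt
    have hk : (t - 1).toNat < (l.filter (fun p => p.2 == "softmax")).length := by omega
    have hget := pvSoft_getElem? l 0 (t - 1).toNat hk
    have harg : ((((t - 1).toNat : Int)) + 1) = t := by omega
    rw [harg] at hget
    have hidx : ((PySem.List.pyGet? (pvSoft l 0) (t - 1)).getD 0) + 1 = (pvBrk t l : Int) := by
      rw [PySem.List.pyGet?_of_nonneg (pvSoft l 0) (by omega)]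
      rw [hget]; simp
    simp only [pvSoft] at hidx
    simp only [hloop, hne0, if_false]
    rw [hidx, PySem.List.slice_to_natCast l (pvBrk t l)]
    simp [pvSP]
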